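-- pv_equiv track=rewrite | github.com/GameMaker2k/Neo-Python-Scripts | binary-card-game.py | generate_cards
-- ===== SOURCE A (Python) =====
-- def generate_cards(num_cards, max_limit=60):
--     """Generates number cards using binary logic."""
--     max_number = min((1 << num_cards) - 1, max_limit)
--     cards = {i + 1: [] for i in range(num_cards)}
--
--     for number in range(1, max_number + 1):
--         for card in range(num_cards):
--             if number & (1 << card):
--                 cards[card + 1].append(number)
--
--     return cards
-- ===== SOURCE B (Python) =====
-- def generate_cards(num_cards, max_limit=60):
--     """Generates number cards using binary logic."""
--     max_number = min((1 << num_cards) - 1, max_limit)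
--
--     def card_numbers(c):
--         # Integers with bit c set come in periodic blocks [start, start + 2^c)
--         # with start = 2^c, 3*2^c, 5*2^c, ...; clip the last block at max_number.
--         block = 1 << c
--         nums = []
--         for start in range(block, max_number + 1, 2 * block):
--             nums.extend(range(start, min(start + block, max_number + 1)))
--         return nums
--
--     # bits at or above max_number's bit length never occur in 1..max_number
--     top = max(max_number, 0).bit_length()
--     return {c + 1: (card_numbers(c) if c < top else []) for c in range(num_cards)}
-- ===== Notes on version B (the rewrite author's own statement) =====
-- stated objective: faster
-- what changed: A maintains a dict and scans every number 1..max_number testing each of the num_cards bits; B has no scanning loop and no incremental dict updates at all: it builds the result as a comprehension over the cards, computing each card's list independently by directly enumerating the periodic blocks [start, start+2^c) of consecutive integers whose bit c is set.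
import Mathlib
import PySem

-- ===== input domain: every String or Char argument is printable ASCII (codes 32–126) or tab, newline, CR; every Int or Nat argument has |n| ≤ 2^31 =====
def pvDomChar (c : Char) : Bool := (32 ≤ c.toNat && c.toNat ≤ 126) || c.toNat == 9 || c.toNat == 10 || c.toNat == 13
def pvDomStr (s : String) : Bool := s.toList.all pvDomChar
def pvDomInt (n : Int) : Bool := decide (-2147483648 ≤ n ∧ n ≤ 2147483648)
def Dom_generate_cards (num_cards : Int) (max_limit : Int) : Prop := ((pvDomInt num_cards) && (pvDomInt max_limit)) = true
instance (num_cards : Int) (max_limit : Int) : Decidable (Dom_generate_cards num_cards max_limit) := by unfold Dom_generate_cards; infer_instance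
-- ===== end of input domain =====

-- B drops A's scan-and-test double loop over an incrementally updated dict and instead builds
-- the result as a per-card comprehension, enumerating each card's numbers by their block structure.

-- ===== PORT A =====
def generate_cards (num_cards : Int) (max_limit : Int) : List (Int × List Int) :=
  -- max_number = min((1 << num_cards) - 1, max_limit); '1 << num_cards' = 2^num_cards, exact for num_cards ≥ 0 (Pre_)
  let max_number : Int := min (2 ^ num_cards.toNat - 1) max_limit
  -- cards = {i + 1: [] for i in range(num_cards)}
  let cards : PySem.Dict Int (List Int) :=
    (PySem.List.pyRange 0 num_cards 1).foldl (fun d i => d.insert (i + 1) []) PySem.Dict.empty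
  -- for number in range(1, max_number+1): for card in range(num_cards):
  --   if number & (1 << card): cards[card+1].append(number)      (1 << card = 2^card, card ≥ 0 in range)
  let cards :=
    (PySem.List.pyRange 1 (max_number + 1) 1).foldl (fun d number =>
      (PySem.List.pyRange 0 num_cards 1).foldl (fun d card =>
        if Int.land number (2 ^ card.toNat) ≠ 0 then
          d.modify (card + 1) [] (fun l => l ++ [number])
        else d) d) cards
  cards.items

-- ===== PORT B =====
-- helper card_numbers(c): nums = []; for start in range(block, max_number+1, 2*block): nums.extend(range(start, min(start+block, max_number+1)))
def pvCardNumbers (max_number : Int) (c : Int) : List Int :=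
  let block : Int := 2 ^ c.toNat      -- 1 << c; c ≥ 0 in range(num_cards)
  (PySem.List.pyRange block (max_number + 1) (2 * block)).foldl
    (fun nums start => nums ++ PySem.List.pyRange start (min (start + block) (max_number + 1)) 1) []

def generate_cards_alt (num_cards : Int) (max_limit : Int) : List (Int × List Int) :=
  let max_number : Int := min (2 ^ num_cards.toNat - 1) max_limit
  -- top = max(max_number, 0).bit_length(); bit_length of m ≥ 0 is Nat.size, exact
  let top : Int := ((max max_number 0).toNat.size : Int)
  -- return {c + 1: (card_numbers(c) if c < top else []) for c in range(num_cards)}  (fresh keys: the dict is the map itself)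
  (PySem.List.pyRange 0 num_cards 1).map (fun c =>
    (c + 1, if c < top then pvCardNumbers max_number c else []))

-- ===== PRECONDITION & SPEC =====
-- Python A raises ValueError ('negative shift count', from 1 << num_cards) iff num_cards < 0; Pre_ excludes exactly that.
def Pre_generate_cards (num_cards : Int) (max_limit : Int) : Prop := 0 ≤ num_cards
instance (num_cards : Int) (max_limit : Int) : Decidable (Pre_generate_cards num_cards max_limit) := by unfold Pre_generate_cards; infer_instance
def pvWitness_generate_cards : Int × Int := (3, 60)

def Spec_generate_cards (num_cards : Int) (max_limit : Int) (out : List (Int × List Int)) : Prop := out = generate_cards_alt num_cards max_limit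
instance (num_cards : Int) (max_limit : Int) (out : List (Int × List Int)) : Decidable (Spec_generate_cards num_cards max_limit out) := by unfold Spec_generate_cards; infer_instance

-- ===== CLAIM (what is proved, stated in full; the proofs are below) =====
def Claim_equal_generate_cards : Prop := ∀ (num_cards : Int) (max_limit : Int), Dom_generate_cards num_cards max_limit → Pre_generate_cards num_cards max_limit → Spec_generate_cards num_cards max_limit (generate_cards num_cards max_limit)

-- ===== LEMMAS AND PROOFS =====

-- ---- arithmetic: bit c of a is set iff a mod 2^(c+1) ≥ 2^c ----
theorem pvTestBit_iff_mod (a c : Nat) : a.testBit c ↔ 2^c ≤ a % 2^(c+1) := by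
  rw [Nat.testBit_eq_decide_div_mod_eq]
  have h1 : a % 2^(c+1) = a % 2^c + 2^c * (a / 2^c % 2) := by
    rw [pow_succ]; exact Nat.mod_mul
  have h2 : a % 2^c < 2^c := Nat.mod_lt _ (by positivity)
  have h3 : a / 2^c % 2 < 2 := Nat.mod_lt _ (by norm_num)
  simp only [decide_eq_true_eq]
  constructor
  · intro h; rw [h1, h]; omega
  · intro h
    rcases (by omega : a / 2^c % 2 = 0 ∨ a / 2^c % 2 = 1) with h4 | h4
    · rw [h4, Nat.mul_zero, Nat.add_zero] at h1; omega
    · exact h4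

theorem pvIntBit_iff (x : Int) (c : Nat) (hx : 0 ≤ x) :
    Int.land x ((2:Int)^c) ≠ 0 ↔ (2:Int)^c ≤ x % (2 * 2^c) := by
  lift x to Nat using hx
  have hl : Int.land (x:Int) ((2:Int)^c) = ((x &&& 2^c : Nat) : Int) := by
    have h : ((2:Int)^c) = ((2^c : Nat) : Int) := by push_cast; ring
    rw [h]; rfl
  rw [hl]
  have h2 : (2 * 2^c : Int) = ((2^(c+1) : Nat) : Int) := by push_cast [pow_succ]; ring
  rw [h2, ← Int.natCast_mod]
  have hb := pvTestBit_iff_mod x c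
  have ha : (x &&& 2^c) = (x.testBit c).toNat * 2^c := Nat.and_two_pow x c
  constructor
  · intro h
    have ht : x.testBit c := by by_contra hf; simp [ha, hf] at h
    exact_mod_cast hb.mp ht
  · intro h
    have ht : x.testBit c := hb.mpr (by exact_mod_cast h)
    simp only [ha, ht, Bool.toNat_true, one_mul]
    intro hcon
    have hp : (0:Int) < ((2^c : Nat) : Int) := by positivity
    omega

-- ---- the core identity: the numbers 1..M with bit c set, in order, are B's blocks concatenated ----
theorem pvCore (M : Int) (c : Nat) :
    (PySem.List.pyRange 1 (M + 1) 1).filter (fun x => decide (Int.land x ((2:Int)^c) ≠ 0))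
      = (PySem.List.pyRange ((2:Int)^c) (M + 1) (2 * 2^c)).flatMap
          (fun s => PySem.List.pyRange s (min (s + 2^c) (M + 1)) 1) := by
  set P : Int := (2:Int)^c with hPdef
  have hP : (0:Int) < P := by positivity
  have hS : (0:Int) < 2 * P := by positivity
  set L := PySem.List.pyRange P (M + 1) (2 * P) with hLdef
  have hLpw : L.Pairwise (· < ·) := by
    rw [hLdef, PySem.List.pyRange_of_pos _ _ hS, List.pairwise_map]
    refine List.pairwise_lt_range.imp ?_
    intro k1 k2 hk
    have hkc : (k1:Int) < (k2:Int) := by exact_mod_cast hk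
    nlinarith
  have hmemL : ∀ x : Int, (x ∈ (PySem.List.pyRange 1 (M + 1) 1).filter (fun x => decide (Int.land x ((2:Int)^c) ≠ 0)))
      ↔ (1 ≤ x ∧ x < M + 1 ∧ P ≤ x % (2 * P)) := by
    intro x
    rw [List.mem_filter, PySem.List.mem_pyRange_one]
    constructor
    · rintro ⟨⟨h1, h2⟩, h3⟩
      refine ⟨h1, h2, ?_⟩
      exact (pvIntBit_iff x c (by omega)).mp (by simpa using h3)
    · rintro ⟨h1, h2, h3⟩
      exact ⟨⟨h1, h2⟩, by simpa using (pvIntBit_iff x c (by omega)).mpr h3⟩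
  have hmemR : ∀ x : Int, (x ∈ L.flatMap (fun s => PySem.List.pyRange s (min (s + P) (M + 1)) 1))
      ↔ (1 ≤ x ∧ x < M + 1 ∧ P ≤ x % (2 * P)) := by
    intro x
    rw [List.mem_flatMap]
    constructor
    · rintro ⟨s, hs, hx⟩
      rw [hLdef, PySem.List.mem_pyRange_iff_of_pos hS] at hs
      obtain ⟨hs1, hs2, k, hk⟩ := hs
      rw [PySem.List.mem_pyRange_one, lt_min_iff] at hx
      obtain ⟨hx1, hx2, hx3⟩ := hx
      have hk0 : 0 ≤ k := by nlinarith
      have hP1 : (1:Int) ≤ P := hP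
      refine ⟨by omega, hx3, ?_⟩
      have hxe : x = (P + (x - s)) + (2*P) * k := by omega
      rw [hxe, Int.add_mul_emod_self_left, Int.emod_eq_of_lt (by omega) (by omega)]
      omega
    · rintro ⟨h1, h2, h3⟩
      have hmod := Int.mul_ediv_add_emod x (2*P)
      have hm0 : 0 ≤ x % (2*P) := Int.emod_nonneg x (by omega)
      have hm1 : x % (2*P) < 2*P := Int.emod_lt_of_pos x hS
      have hq : 0 ≤ x / (2*P) := Int.ediv_nonneg (by omega) (by omega)
      have hq0 : 0 ≤ (2*P) * (x / (2*P)) := mul_nonneg (by omega) hq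
      refine ⟨(2*P) * (x / (2*P)) + P, ?_, ?_⟩
      · rw [hLdef, PySem.List.mem_pyRange_iff_of_pos hS]
        exact ⟨by omega, by omega, ⟨x / (2*P), by ring⟩⟩
      · rw [PySem.List.mem_pyRange_one, lt_min_iff]
        exact ⟨by omega, by omega, by omega⟩
  have hpwL : ((PySem.List.pyRange 1 (M + 1) 1).filter (fun x => decide (Int.land x ((2:Int)^c) ≠ 0))).Pairwise (· < ·) :=
    List.Pairwise.sublist (List.filter_sublist) (PySem.List.pairwise_lt_pyRange_one 1 (M+1))
  have hLdvd : ∀ s ∈ L, P ≤ s ∧ s < M + 1 ∧ (2*P) ∣ s - P := by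
    intro s hs
    rw [hLdef, PySem.List.mem_pyRange_iff_of_pos hS] at hs
    exact hs
  have hpwR : (L.flatMap (fun s => PySem.List.pyRange s (min (s + P) (M + 1)) 1)).Pairwise (· < ·) := by
    rw [List.flatMap_def, List.pairwise_flatten]
    constructor
    · rintro l hl
      obtain ⟨s, -, rfl⟩ := List.mem_map.mp hl
      exact PySem.List.pairwise_lt_pyRange_one _ _
    · rw [List.pairwise_map]
      refine List.Pairwise.imp_of_mem ?_ hLpw
      intro s1 s2 hs1 hs2 hlt x hx y hy
      obtain ⟨ha1, -, hd1⟩ := hLdvd s1 hs1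
      obtain ⟨ha2, -, hd2⟩ := hLdvd s2 hs2
      have hdvd : (2*P) ∣ s2 - s1 := by
        have hsub := dvd_sub hd2 hd1
        simpa using hsub
      have hge : 2*P ≤ s2 - s1 := Int.le_of_dvd (by omega) hdvd
      rw [PySem.List.mem_pyRange_one, lt_min_iff] at hx hy
      omega
  refine List.eq_of_perm_of_sorted (fun a b _ _ hab hba => by omega) hpwL hpwR ?_
  rw [List.perm_ext_iff_of_nodup (hpwL.imp (fun h => ne_of_lt h)) (hpwR.imp (fun h => ne_of_lt h))]
  intro a
  rw [hmemL, hmemR]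

-- ---- loop shapes of A's dict updates ----
theorem pvA_inner (x : Int) (cards : List Int) (d : PySem.Dict Int (List Int)) (k : Int) :
    ((cards.foldl (fun d card =>
        if Int.land x ((2:Int) ^ card.toNat) ≠ 0 then d.modify (card + 1) [] (fun l => l ++ [x]) else d) d).getD k [])
    = d.getD k [] ++ (cards.filter (fun card => decide (Int.land x ((2:Int) ^ card.toNat) ≠ 0) && (card + 1 == k))).map (fun _ => x) := by
  induction cards generalizing d with
  | nil => simp
  | cons a t ih =>
    rw [List.foldl_cons, List.filter_cons]
    by_cases hb : Int.land x ((2:Int) ^ a.toNat) ≠ 0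
    · rw [if_pos hb]
      by_cases hk : a + 1 = k
      · subst hk
        have ht : (decide (Int.land x ((2:Int) ^ a.toNat) ≠ 0) && (a + 1 == a + 1)) = true := by
          simp [hb]
        rw [ht, if_pos rfl, ih, PySem.Dict.getD_modify, if_pos rfl, List.map_cons, List.append_assoc]
        rfl
      · have ht : (decide (Int.land x ((2:Int) ^ a.toNat) ≠ 0) && (a + 1 == k)) = false := by
          simp [hk]
        rw [ht, if_neg (by simp), ih, PySem.Dict.getD_modify, if_neg (fun h => hk h.symm)]
    · rw [if_neg hb]
      have ht : (decide (Int.land x ((2:Int) ^ a.toNat) ≠ 0) && (a + 1 == k)) = false := by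
        simp; intro h; exact absurd h hb
      rw [ht, if_neg (by simp), ih]

theorem pvA_outer (numbers cards : List Int) (d : PySem.Dict Int (List Int)) (k : Int) :
    ((numbers.foldl (fun d x =>
        cards.foldl (fun d card =>
          if Int.land x ((2:Int) ^ card.toNat) ≠ 0 then d.modify (card + 1) [] (fun l => l ++ [x]) else d) d) d).getD k [])
    = d.getD k [] ++ numbers.flatMap (fun x =>
        (cards.filter (fun card => decide (Int.land x ((2:Int) ^ card.toNat) ≠ 0) && (card + 1 == k))).map (fun _ => x)) := by
  induction numbers generalizing d with
  | nil => simp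
  | cons a t ih =>
    rw [List.foldl_cons, ih, pvA_inner, List.flatMap_cons, List.append_assoc]

-- ---- keys are untouched by the modify loops (every modified key is already present) ----
theorem pvKeys_modify_mem (d : PySem.Dict Int (List Int)) (k : Int) (f : List Int → List Int)
    (h : k ∈ d.keys) : (d.modify k [] f).keys = d.keys := by
  rw [PySem.Dict.keys_modify, PySem.Dict.keys_insert_of_contains]
  exact (PySem.Dict.contains_iff_mem_keys d k).mpr h

theorem pvKeys_A_inner (x : Int) (cards : List Int) (d : PySem.Dict Int (List Int))
    (h : ∀ card ∈ cards, card + 1 ∈ d.keys) :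
    ((cards.foldl (fun d card =>
        if Int.land x ((2:Int) ^ card.toNat) ≠ 0 then d.modify (card + 1) [] (fun l => l ++ [x]) else d) d).keys)
    = d.keys := by
  induction cards generalizing d with
  | nil => rfl
  | cons a t ih =>
    rw [List.foldl_cons]
    by_cases hb : Int.land x ((2:Int) ^ a.toNat) ≠ 0
    · have hm := pvKeys_modify_mem d (a+1) (fun l => l ++ [x]) (h a (by simp))
      rw [if_pos hb, ih _ (fun c hc => by rw [hm]; exact h c (by simp [hc])), hm]
    · rw [if_neg hb, ih _ (fun c hc => h c (by simp [hc]))]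

theorem pvKeys_A (numbers cards : List Int) (d : PySem.Dict Int (List Int))
    (h : ∀ card ∈ cards, card + 1 ∈ d.keys) :
    ((numbers.foldl (fun d x =>
        cards.foldl (fun d card =>
          if Int.land x ((2:Int) ^ card.toNat) ≠ 0 then d.modify (card + 1) [] (fun l => l ++ [x]) else d) d) d).keys)
    = d.keys := by
  induction numbers generalizing d with
  | nil => rfl
  | cons a t ih =>
    rw [List.foldl_cons]
    have hi := pvKeys_A_inner a cards d h
    rw [ih _ (fun c hc => by rw [hi]; exact h c hc), hi]

-- ---- items of a dict with Nodup keys are determined by keys and getD ----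
theorem pvItems_eq_map_keys (d : PySem.Dict Int (List Int)) (hn : d.keys.Nodup) :
    d.items = d.keys.map (fun k => (k, d.getD k [])) := by
  have h1 : d.keys = d.items.map (·.1) := rfl
  rw [h1, List.map_map]
  have h2 : ∀ p ∈ d.items, ((fun k => (k, d.getD k [])) ∘ (·.1)) p = id p := by
    intro p hp
    have h3 := PySem.Dict.getD_of_mem_items d (k := p.1) (v := p.2) (by simpa using hp) hn []
    simp [h3]
  rw [List.map_congr_left h2, List.map_id]

-- ---- the initial dict {i+1: [] for i in range(n)} ----
theorem pvInit_items (n : Int) :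
    ((PySem.List.pyRange 0 n 1).foldl (fun d i => d.insert (i + 1) ([] : List Int)) PySem.Dict.empty).items
    = (PySem.List.pyRange 0 n 1).map (fun i => (i + 1, ([] : List Int))) := by
  rw [PySem.Dict.items_foldl_insert_fresh _ _ _ _ (fun a _ => PySem.Dict.contains_empty _)]
  · rfl
  · exact (List.nodup_map_iff_inj_on (PySem.List.nodup_pyRange_one 0 n)).mpr (by intro a _ b _ h; omega)

-- ---- filter picking out a single element of a Nodup list ----
theorem pvFilter_single (l : List Int) (c : Int) (p : Int → Bool) (hn : l.Nodup) (hc : c ∈ l) :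
    l.filter (fun y => p y && (y + 1 == c + 1)) = if p c then [c] else [] := by
  induction l with
  | nil => simp at hc
  | cons a t ih =>
    rw [List.filter_cons]
    rcases List.mem_cons.mp hc with h | h
    · subst h
      have hnt : c ∉ t := (List.nodup_cons.mp hn).1
      have hft : t.filter (fun y => p y && (y + 1 == c + 1)) = [] := by
        apply List.filter_eq_nil_iff.mpr
        intro y hy
        simp only [Bool.and_eq_true, beq_iff_eq, not_and]
        intro _ h2
        exact absurd ((by omega : y = c) ▸ hy) hnt
      by_cases hp : p c
      · rw [if_pos (by simp [hp]), hft, if_pos hp]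
      · rw [if_neg (by simp [hp]), hft, if_neg hp]
    · have hna : a ≠ c := by rintro rfl; exact (List.nodup_cons.mp hn).1 h
      rw [if_neg (by simp; intro _; omega), ih (List.nodup_cons.mp hn).2 h]

theorem pvFlatMap_if (l : List Int) (p : Int → Bool) (c : Int) :
    l.flatMap (fun x => (if p x then [c] else []).map (fun _ => x)) = l.filter p := by
  induction l with
  | nil => rfl
  | cons a t ih =>
    rw [List.flatMap_cons, ih, List.filter_cons]
    by_cases h : p a
    · rw [if_pos h, if_pos h]; rfl
    · rw [if_neg h, if_neg h]; rfl

-- ---- B's helper as a flatMap ----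
theorem pvCardNumbers_eq (M c : Int) :
    pvCardNumbers M c
      = (PySem.List.pyRange ((2:Int)^c.toNat) (M + 1) (2 * 2^c.toNat)).flatMap
          (fun s => PySem.List.pyRange s (min (s + 2^c.toNat) (M + 1)) 1) := by
  unfold pvCardNumbers
  rw [PySem.List.foldl_append_eq_flatMap]
  rfl

-- ---- cards at or above bit_length(max_number) get the empty list either way ----
theorem pvCardNumbers_nil (M c : Int) (hc : 0 ≤ c) (h : ¬ c < (((max M 0).toNat.size : Nat) : Int)) :
    pvCardNumbers M c = [] := by
  have hsz : (max M 0).toNat.size ≤ c.toNat := by omega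
  have hMlt : (max M 0).toNat < 2 ^ c.toNat := Nat.size_le.mp hsz
  have hMc : M + 1 ≤ (2:Int) ^ c.toNat := by
    have h2 : ((max M 0).toNat : Int) < ((2 ^ c.toNat : Nat) : Int) := by exact_mod_cast hMlt
    have h3 : (((2:Nat) ^ c.toNat : Nat) : Int) = (2:Int) ^ c.toNat := by push_cast; ring
    rw [h3] at h2
    have h4 : ((max M 0).toNat : Int) = max M 0 := Int.toNat_of_nonneg (by omega)
    omega
  unfold pvCardNumbers
  have hnil : PySem.List.pyRange ((2:Int) ^ c.toNat) (M + 1) (2 * 2 ^ c.toNat) = [] := by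
    rw [PySem.List.pyRange_of_pos _ _ (by positivity)]
    rw [if_neg (by omega), List.range_zero, List.map_nil]
  simp only []
  rw [hnil, List.foldl_nil]

-- ===== VERDICT (by name: the statement is the Claim_ definition above) =====
theorem generate_cards_spec : Claim_equal_generate_cards := by
  intro n m _ _
  unfold Spec_generate_cards generate_cards generate_cards_alt
  simp only []
  set M : Int := min (2 ^ n.toNat - 1) m with hM
  set K : List Int := PySem.List.pyRange 0 n 1 with hK
  have hKn : K.Nodup := PySem.List.nodup_pyRange_one 0 n
  set d0 : PySem.Dict Int (List Int) := K.foldl (fun d i => d.insert (i + 1) []) PySem.Dict.empty with hd0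
  have hitems0 : d0.items = K.map (fun i => (i + 1, ([] : List Int))) := pvInit_items n
  have hkeys0 : d0.keys = K.map (fun i => i + 1) := by
    have h1 : d0.keys = d0.items.map (·.1) := rfl
    rw [h1, hitems0, List.map_map]
    rfl
  have hkn0 : d0.keys.Nodup := by
    rw [hkeys0]
    exact (List.nodup_map_iff_inj_on hKn).mpr (by intro a _ b _ h; omega)
  have hmemk : ∀ c ∈ K, c + 1 ∈ d0.keys := by
    intro c hc; rw [hkeys0]; exact List.mem_map.mpr ⟨c, hc, rfl⟩
  have hkeysA := pvKeys_A (PySem.List.pyRange 1 (M + 1) 1) K d0 hmemk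
  rw [pvItems_eq_map_keys _ (by rw [hkeysA]; exact hkn0), hkeysA, hkeys0, List.map_map]
  apply List.map_congr_left
  intro c hc
  simp only [Function.comp]
  have hgd0 : d0.getD (c + 1) [] = [] := by
    refine PySem.Dict.getD_of_mem_items d0 ?_ hkn0 []
    rw [hitems0]
    exact List.mem_map.mpr ⟨c, hc, rfl⟩
  rw [pvA_outer, hgd0, List.nil_append]
  have hfs : ∀ p : Int → Bool, K.filter (fun y => p y && (y + 1 == c + 1)) = if p c then [c] else [] :=
    fun p => pvFilter_single K c p hKn hc
  simp only [hfs]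
  rw [pvFlatMap_if (PySem.List.pyRange 1 (M + 1) 1) (fun x => decide (Int.land x ((2:Int) ^ c.toNat) ≠ 0)) c]
  rw [pvCore M c.toNat, ← pvCardNumbers_eq]
  have hc0 : 0 ≤ c := by
    rw [hK, PySem.List.mem_pyRange_one] at hc; omega
  by_cases hct : c < (((max M 0).toNat.size : Nat) : Int)
  · rw [if_pos hct]
  · rw [if_neg hct, pvCardNumbers_nil M c hc0 hct]
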